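-- pv_equiv track=rewrite | github.com/LGSW/My-Leetcode | P717_1-bit and 2-bit Characters.py | isOneBitCharacter1
-- ===== SOURCE A (Python) =====
-- def isOneBitCharacter1(bits):
--     """
--     :type bits: List[int]
--     :rtype: bool
--     """
--     if not bits: return False
--     n = len(bits)
--
--     index = 0
--     while index < n:
--         if index == n - 1: return True
--         if bits[index] == 1:
--             index += 2
--         else:
--             index += 1
--     return False
-- ===== SOURCE B (Python) =====
-- def isOneBitCharacter1(bits):
--     if not bits: return False
--     i = len(bits) - 2
--     count = 0
--     while i >= 0 and bits[i] == 1: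
--         count += 1
--         i -= 1
--     return count % 2 == 0
-- ===== Notes on version B (the rewrite author's own statement) =====
-- stated objective: faster
-- what changed: Replaces the front-to-back greedy one-or-two-step parse of the whole list with a single backward scan that counts the run of 1s immediately before the last element and returns whether that run length is even.
import Mathlib
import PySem

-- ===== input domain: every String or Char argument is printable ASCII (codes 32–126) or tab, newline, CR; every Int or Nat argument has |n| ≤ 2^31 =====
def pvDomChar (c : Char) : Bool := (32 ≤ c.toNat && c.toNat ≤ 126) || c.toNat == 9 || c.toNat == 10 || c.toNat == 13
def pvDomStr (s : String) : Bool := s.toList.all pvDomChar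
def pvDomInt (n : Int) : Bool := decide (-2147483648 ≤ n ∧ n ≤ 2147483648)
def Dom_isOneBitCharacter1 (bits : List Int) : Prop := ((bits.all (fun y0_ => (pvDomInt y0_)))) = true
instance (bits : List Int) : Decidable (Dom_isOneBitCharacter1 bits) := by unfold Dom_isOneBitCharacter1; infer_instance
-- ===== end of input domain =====

-- B scans backward counting the run of 1s before the last element and tests its parity,
-- instead of A's greedy front-to-back one-or-two-step parse; alternative decomposition, same cost.

-- ===== PORT A =====
-- the while loop of A: advance by 2 on a 1, by 1 otherwise
def pvLoopA (bits : List Int) (n index : Int) : Bool :=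
  if _h : index < n then
    if index == n - 1 then true
    else
      match PySem.List.pyGet? bits index with
      | some v => if v == 1 then pvLoopA bits n (index + 2) else pvLoopA bits n (index + 1)
      | none => false   -- unreachable in A's loop: 0 ≤ index < n = len(bits)
  else false
termination_by (n - index).toNat
decreasing_by all_goals omega

def isOneBitCharacter1 (bits : List Int) : Bool :=
  if bits = [] then false
  else pvLoopA bits (PySem.List.len bits) 0

-- ===== PORT B =====
-- the while loop of B: count 1s going backward from index i
def pvCountRun (bits : List Int) (i : Int) : Int :=
  if _h : 0 ≤ i then
    match PySem.List.pyGet? bits i with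
    | some v => if v == 1 then 1 + pvCountRun bits (i - 1) else 0
    | none => 0   -- unreachable in B's loop: i < len(bits) always
  else 0
termination_by (i + 1).toNat
decreasing_by omega

def isOneBitCharacter1_alt (bits : List Int) : Bool :=
  if bits = [] then false
  else PySem.Int.mod (pvCountRun bits (PySem.List.len bits - 2)) 2 == 0

-- ===== PRECONDITION & SPEC =====
def Spec_isOneBitCharacter1 (bits : List Int) (out : Bool) : Prop := out = isOneBitCharacter1_alt bits
instance (bits : List Int) (out : Bool) : Decidable (Spec_isOneBitCharacter1 bits out) := by unfold Spec_isOneBitCharacter1; infer_instance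

-- ===== CLAIM (what is proved, stated in full; the proofs are below) =====
def Claim_equal_isOneBitCharacter1 : Prop := ∀ (bits : List Int), Dom_isOneBitCharacter1 bits → Spec_isOneBitCharacter1 bits (isOneBitCharacter1 bits)

-- ===== LEMMAS AND PROOFS =====

theorem pvCountRun_neg (bits : List Int) (i : Int) (hi : i < 0) :
    pvCountRun bits i = 0 := by
  rw [pvCountRun, dif_neg (by omega)]

theorem pvCountRun_step (bits : List Int) (i : Int) (hi : 0 ≤ i) (v : Int)
    (hg : PySem.List.pyGet? bits i = some v) :
    pvCountRun bits i = if v == 1 then 1 + pvCountRun bits (i - 1) else 0 := by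
  rw [pvCountRun, dif_pos hi, hg]

theorem pvCountRun_nonneg (bits : List Int) (i : Int) : 0 ≤ pvCountRun bits i := by
  rw [pvCountRun]
  split
  · split
    · split
      · have := pvCountRun_nonneg bits (i - 1); omega
      · omega
    · omega
  · omega
termination_by (i + 1).toNat
decreasing_by omega

theorem pvCountRun_le (bits : List Int) (i : Int) (hi : -1 ≤ i) :
    pvCountRun bits i ≤ i + 1 := by
  rw [pvCountRun]
  split
  · split
    · split
      · have := pvCountRun_le bits (i - 1) (by omega); omega
      · omega
    · omega
  · omega
termination_by (i + 1).toNat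
decreasing_by omega

theorem pvCountRun_pos (bits : List Int) (i : Int) (hi : 0 ≤ i)
    (h : PySem.List.pyGet? bits i = some 1) : 1 ≤ pvCountRun bits i := by
  rw [pvCountRun_step bits i hi 1 h]
  simp
  have := pvCountRun_nonneg bits (i - 1); omega

-- every position strictly inside the counted run holds a 1
theorem pvCountRun_ones (bits : List Int) (i j : Int)
    (hj1 : i - pvCountRun bits i < j) (hj2 : j ≤ i) :
    PySem.List.pyGet? bits j = some 1 := by
  by_cases hi : 0 ≤ i
  case neg => rw [pvCountRun_neg bits i (by omega)] at hj1; omega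
  cases hg : PySem.List.pyGet? bits i with
  | none =>
    have : pvCountRun bits i = 0 := by rw [pvCountRun, dif_pos hi, hg]
    rw [this] at hj1; omega
  | some v =>
    rw [pvCountRun_step bits i hi v hg] at hj1
    by_cases hv : v = 1
    · subst hv
      simp only [BEq.rfl, if_true] at hj1
      rcases eq_or_lt_of_le hj2 with hji | hji
      · subst hji; exact hg
      · exact pvCountRun_ones bits (i - 1) j (by omega) (by omega)
    · rw [if_neg (by simpa using hv)] at hj1; omega
termination_by (i + 1).toNat
decreasing_by omega

-- the element just below the counted run, when it exists, is not a 1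
theorem pvCountRun_stop (bits : List Int) (i : Int)
    (h0 : 0 ≤ i - pvCountRun bits i) (hi : i < (bits.length : Int)) :
    PySem.List.pyGet? bits (i - pvCountRun bits i) ≠ some 1 := by
  have hc := pvCountRun_nonneg bits i
  have hi0 : 0 ≤ i := by omega
  have hg : PySem.List.pyGet? bits i = some bits[i.toNat] :=
    PySem.List.pyGet?_eq_some_getElem bits hi0 hi
  rw [pvCountRun_step bits i hi0 _ hg] at h0 ⊢
  by_cases hv : bits[i.toNat] = 1
  · rw [if_pos (by simpa using hv)] at h0 ⊢
    have e : i - (1 + pvCountRun bits (i - 1)) = (i - 1) - pvCountRun bits (i - 1) := by ring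
    rw [e] at h0 ⊢
    exact pvCountRun_stop bits (i - 1) h0 (by omega)
  · rw [if_neg (by simpa using hv)] at h0 ⊢
    rw [sub_zero]
    intro h
    rw [h] at hg
    exact hv (Option.some.inj hg).symm
termination_by (i + 1).toNat
decreasing_by omega

-- main invariant: A's loop from any start index decides the parity of the portion
-- of the trailing-ones run it can still see
theorem pvLoopA_char (bits : List Int) (index : Int)
    (h0 : 0 ≤ index) (h1 : index ≤ (bits.length : Int) - 1) :
    pvLoopA bits (bits.length : Int) index
      = (min (pvCountRun bits ((bits.length : Int) - 2)) ((bits.length : Int) - 1 - index) % 2 == 0) := by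
  have htn : 0 ≤ pvCountRun bits ((bits.length : Int) - 2) :=
    pvCountRun_nonneg bits ((bits.length : Int) - 2)
  have htl : pvCountRun bits ((bits.length : Int) - 2) ≤ (bits.length : Int) - 1 := by
    have := pvCountRun_le bits ((bits.length : Int) - 2) (by omega); omega
  set n : Int := (bits.length : Int) with hn
  set t : Int := pvCountRun bits (n - 2) with ht
  rw [pvLoopA]
  rw [dif_pos (show index < n by omega)]
  by_cases hlast : index = n - 1
  · rw [if_pos (by simpa using hlast)]
    have e : min t (n - 1 - index) = 0 := by omega
    rw [e]; decide
  · rw [if_neg (by simpa using hlast)]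
    have hlt : index < n - 1 := by omega
    have hg : PySem.List.pyGet? bits index = some bits[index.toNat] :=
      PySem.List.pyGet?_eq_some_getElem bits h0 (by omega)
    rw [hg]
    change (if bits[index.toNat] == 1 then pvLoopA bits n (index + 2) else pvLoopA bits n (index + 1)) = _
    by_cases hv : bits[index.toNat] = 1
    · rw [if_pos (by simpa using hv)]
      by_cases hpen : index = n - 2
      · -- penultimate element is 1, so t ≥ 1; the loop jumps past the end → False
        have hg2 : PySem.List.pyGet? bits (n - 2) = some 1 := by
          rw [← hpen, hg, hv]
        have ht1 : 1 ≤ t := by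
          rw [ht]; exact pvCountRun_pos bits (n - 2) (by omega) hg2
        rw [pvLoopA, dif_neg (by omega)]
        have e : min t (n - 1 - index) = 1 := by omega
        rw [e]; decide
      · have hih := pvLoopA_char bits (index + 2) (by omega) (by omega)
        rw [← hn, ← ht] at hih
        rw [hih]
        rcases lt_trichotomy t (n - 1 - index) with hc | hc | hc
        · rcases eq_or_lt_of_le (show t ≤ n - 2 - index by omega) with hc2 | hc2
          · -- t = n-2-index: bits[index] sits just below the run, so it is not 1
            exfalso
            have hstop := pvCountRun_stop bits (n - 2)
              (show 0 ≤ (n - 2) - pvCountRun bits (n - 2) by rw [← ht]; omega)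
              (by omega)
            rw [← ht] at hstop
            have e : (n - 2) - t = index := by omega
            rw [e] at hstop
            exact hstop (by rw [hg, hv])
          · have e1 : min t (n - 1 - index) = t := by omega
            have e2 : min t (n - 1 - (index + 2)) = t := by omega
            rw [e1, e2]
        · have e1 : min t (n - 1 - index) = t := by omega
          have e2 : min t (n - 1 - (index + 2)) = t - 2 := by omega
          rw [e1, e2]
          have e3 : t % 2 = (t - 2) % 2 := by omega
          rw [e3]
        · have e1 : min t (n - 1 - index) = n - 1 - index := by omega
          have e2 : min t (n - 1 - (index + 2)) = n - 1 - index - 2 := by omega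
          rw [e1, e2]
          have e3 : (n - 1 - index) % 2 = (n - 1 - index - 2) % 2 := by omega
          rw [e3]
    · rw [if_neg (by simpa using hv)]
      -- bits[index] ≠ 1, so index lies strictly below the trailing run
      have hbelow : index < n - 1 - t := by
        by_contra hge
        have hone := pvCountRun_ones bits (n - 2) index (by rw [← ht]; omega) (by omega)
        rw [hg] at hone
        exact hv (Option.some.inj hone)
      have hih := pvLoopA_char bits (index + 1) (by omega) (by omega)
      rw [← hn, ← ht] at hih
      rw [hih]
      have e1 : min t (n - 1 - index) = t := by omega
      have e2 : min t (n - 1 - (index + 1)) = t := by omega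
      rw [e1, e2]
termination_by (bits.length - index).toNat
decreasing_by all_goals omega

-- ===== VERDICT (by name: the statement is the Claim_ definition above) =====
theorem isOneBitCharacter1_spec : Claim_equal_isOneBitCharacter1 := by
  intro bits _
  unfold Spec_isOneBitCharacter1 isOneBitCharacter1 isOneBitCharacter1_alt
  by_cases hnil : bits = []
  · simp [hnil]
  · rw [if_neg hnil, if_neg hnil]
    have hlen : 1 ≤ (bits.length : Int) := by
      have : bits.length ≠ 0 := fun h => hnil (List.eq_nil_of_length_eq_zero h)
      omega
    rw [PySem.List.len_eq]
    rw [pvLoopA_char bits 0 le_rfl (by omega)]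
    have htn := pvCountRun_nonneg bits ((bits.length : Int) - 2)
    have htl := pvCountRun_le bits ((bits.length : Int) - 2) (by omega)
    have e : min (pvCountRun bits ((bits.length : Int) - 2)) ((bits.length : Int) - 1 - 0)
        = pvCountRun bits ((bits.length : Int) - 2) := by omega
    rw [e]
    rw [PySem.Int.mod_eq_emod_of_pos (by omega)]
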